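-- pv_equiv track=rewrite | github.com/tomhel/AoC | 2019/day17/1.py | capture_camera
-- ===== SOURCE A (Python) =====
-- def capture_camera(out_buffer):
--     x, y = 0, 0
--     capture = {}
--
--     for a in out_buffer:
--         if a == 10:
--             y += 1
--             x = 0
--             continue
--
--         capture[(x, y)] = chr(a)
--         x += 1
--
--     return capture
-- ===== SOURCE B (Python) =====
-- def capture_camera(out_buffer):
--     rows = []
--     cur = []
--     for a in out_buffer:
--         if a == 10:
--             rows.append(cur)
--             cur = []
--         else:
--             cur.append(a)
--     rows.append(cur)
--
--     capture = {}
--     for y, line in enumerate(rows):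
--         for x, a in enumerate(line):
--             capture[(x, y)] = chr(a)
--     return capture
-- ===== Notes on version B (the rewrite author's own statement) =====
-- stated objective: alternative
-- what changed: B first splits the byte buffer into an explicit list of rows and then fills the grid with a nested enumerate pass over rows and cells, instead of threading running x,y counters through one flat loop.
import Mathlib
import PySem

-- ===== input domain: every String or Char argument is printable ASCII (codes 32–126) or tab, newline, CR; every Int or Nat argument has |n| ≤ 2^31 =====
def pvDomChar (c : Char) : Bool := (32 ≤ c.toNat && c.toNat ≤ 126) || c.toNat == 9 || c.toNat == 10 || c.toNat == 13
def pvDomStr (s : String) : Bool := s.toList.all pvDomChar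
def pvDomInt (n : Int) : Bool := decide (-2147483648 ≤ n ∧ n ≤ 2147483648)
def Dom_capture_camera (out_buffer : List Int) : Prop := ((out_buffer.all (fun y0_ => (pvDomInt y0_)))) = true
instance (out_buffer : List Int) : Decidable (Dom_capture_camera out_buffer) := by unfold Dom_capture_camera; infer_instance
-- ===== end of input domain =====

-- B splits the buffer into an explicit row list and fills the grid with a nested enumerate pass,
-- instead of A's flat loop threading running x,y counters; same cost, different decomposition.


-- chr(a) for a valid non-surrogate codepoint (exact on Pre_; shared primitive of both ports)
def pyChr (a : Int) : String := String.ofList [Char.ofNat a.toNat]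

-- ===== PORT A =====
def captureLoopA : List Int → Int → Int → PySem.Dict (Int × Int) String → PySem.Dict (Int × Int) String
  | [], _, _, cap => cap
  | a :: rest, x, y, cap =>
    if a = 10 then captureLoopA rest 0 (y + 1) cap
    else captureLoopA rest (x + 1) y (cap.insert (x, y) (pyChr a))

def capture_camera (out_buffer : List Int) : List (Int × Int × String) :=
  (captureLoopA out_buffer 0 0 PySem.Dict.empty).items.map (fun p => (p.1.1, p.1.2, p.2))

-- ===== PORT B =====
def splitRowsB : List Int → List Int → List (List Int)
  | [], cur => [cur]
  | a :: rest, cur => if a = 10 then cur :: splitRowsB rest [] else splitRowsB rest (cur ++ [a])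

def capture_camera_alt (out_buffer : List Int) : List (Int × Int × String) :=
  let rows := splitRowsB out_buffer []
  let cap := (PySem.List.enumerate rows 0).foldl
    (fun cap p =>
      (PySem.List.enumerate p.2 0).foldl
        (fun cap q => cap.insert (q.1, p.1) (pyChr q.2)) cap)
    PySem.Dict.empty
  cap.items.map (fun p => (p.1.1, p.1.2, p.2))

-- ===== PRECONDITION & SPEC =====
-- Pre_ admits every code on which Python's chr returns a representable string: 10 or any valid
-- codepoint 0..0x10FFFF outside the surrogate block 0xD800..0xDFFF; negatives and codes past
-- 0x10FFFF make chr raise ValueError, and a surrogate's chr value is a lone-surrogate string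
-- not representable as a Lean String (both ports would return the same thing there anyway).
def Pre_capture_camera (out_buffer : List Int) : Prop :=
  ∀ a ∈ out_buffer, a = 10 ∨ (0 ≤ a ∧ a ≤ 1114111 ∧ (a < 55296 ∨ 57344 ≤ a))
instance (out_buffer : List Int) : Decidable (Pre_capture_camera out_buffer) := by
  unfold Pre_capture_camera; infer_instance
def pvWitness_capture_camera : List Int := [35, 46, 10, 46]

def Spec_capture_camera (out_buffer : List Int) (out : List (Int × Int × String)) : Prop := out = capture_camera_alt out_buffer
instance (out_buffer : List Int) (out : List (Int × Int × String)) : Decidable (Spec_capture_camera out_buffer out) := by unfold Spec_capture_camera; infer_instance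

-- ===== CLAIM (what is proved, stated in full; the proofs are below) =====
def Claim_equal_capture_camera : Prop := ∀ (out_buffer : List Int), Dom_capture_camera out_buffer → Pre_capture_camera out_buffer → Spec_capture_camera out_buffer (capture_camera out_buffer)

-- ===== LEMMAS AND PROOFS =====

-- canonical flat result of scanning the buffer from position (x, y)
def goA : List Int → Int → Int → List ((Int × Int) × String)
  | [], _, _ => []
  | a :: rest, x, y =>
    if a = 10 then goA rest 0 (y + 1) else ((x, y), pyChr a) :: goA rest (x + 1) y

-- one row, cells from column x0
def lineFrom : List Int → Int → Int → List ((Int × Int) × String)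
  | [], _, _ => []
  | a :: rest, x, y => ((x, y), pyChr a) :: lineFrom rest (x + 1) y

-- rows from row index y
def rowsFlat : List (List Int) → Int → List ((Int × Int) × String)
  | [], _ => []
  | l :: ls, y => lineFrom l 0 y ++ rowsFlat ls (y + 1)

theorem captureLoopA_items (buf : List Int) :
    ∀ (x y : Int) (cap : PySem.Dict (Int × Int) String),
      (∀ k ∈ cap.keys, k.2 < y ∨ (k.2 = y ∧ k.1 < x)) →
      (captureLoopA buf x y cap).items = cap.items ++ goA buf x y := by
  induction buf with
  | nil => intro x y cap _; simp [captureLoopA, goA]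
  | cons a rest ih =>
    intro x y cap hinv
    by_cases h10 : a = 10
    · simp only [captureLoopA, goA, h10]
      exact ih 0 (y + 1) cap (fun k hk => by rcases hinv k hk with h | h <;> omega)
    · have hfresh : cap.contains (x, y) = false := by
        rw [Bool.eq_false_iff]
        intro hc
        have := hinv (x, y) ((PySem.Dict.contains_iff_mem_keys _ _).mp hc)
        simp at this
      simp only [captureLoopA, goA, if_neg h10]
      rw [ih (x + 1) y _ (fun k hk => by
        rcases (PySem.Dict.mem_keys_insert _ _ _ _).mp hk with h | h
        · subst h; simp
        · rcases hinv k h with h' | h' <;> omega)]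
      rw [PySem.Dict.items_insert_of_not_contains _ _ hfresh]
      simp

theorem lineFrom_key (line : List Int) :
    ∀ (x0 y : Int) (k : Int × Int), k ∈ (lineFrom line x0 y).map (·.1) → k.2 = y := by
  induction line with
  | nil => intro x0 y k h; simp [lineFrom] at h
  | cons a rest ih =>
    intro x0 y k h
    simp only [lineFrom, List.map_cons, List.mem_cons] at h
    rcases h with h | h
    · subst h; rfl
    · exact ih (x0 + 1) y k (by simpa using h)

theorem innerFold_items (line : List Int) :
    ∀ (x0 y : Int) (cap : PySem.Dict (Int × Int) String),
      (∀ k ∈ cap.keys, k.2 < y ∨ (k.2 = y ∧ k.1 < x0)) →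
      ((PySem.List.enumerate line x0).foldl
          (fun cap q => cap.insert (q.1, y) (pyChr q.2)) cap).items
        = cap.items ++ lineFrom line x0 y := by
  induction line with
  | nil => intro x0 y cap _; simp [PySem.List.enumerate_nil, lineFrom]
  | cons a rest ih =>
    intro x0 y cap hinv
    rw [PySem.List.enumerate_cons]
    have hfresh : cap.contains (x0, y) = false := by
      rw [Bool.eq_false_iff]
      intro hc
      have := hinv (x0, y) ((PySem.Dict.contains_iff_mem_keys _ _).mp hc)
      simp at this
    simp only [List.foldl_cons]
    rw [ih (x0 + 1) y _ (fun k hk => by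
      rcases (PySem.Dict.mem_keys_insert _ _ _ _).mp hk with h | h
      · subst h; simp
      · rcases hinv k h with h' | h' <;> omega)]
    rw [PySem.Dict.items_insert_of_not_contains _ _ hfresh]
    simp [lineFrom]

theorem outerFold_items (rows : List (List Int)) :
    ∀ (y0 : Int) (cap : PySem.Dict (Int × Int) String),
      (∀ k ∈ cap.keys, k.2 < y0) →
      ((PySem.List.enumerate rows y0).foldl
          (fun cap p => (PySem.List.enumerate p.2 0).foldl
            (fun cap q => cap.insert (q.1, p.1) (pyChr q.2)) cap) cap).items
        = cap.items ++ rowsFlat rows y0 := by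
  induction rows with
  | nil => intro y0 cap _; simp [PySem.List.enumerate_nil, rowsFlat]
  | cons l ls ih =>
    intro y0 cap hinv
    rw [PySem.List.enumerate_cons]
    simp only [List.foldl_cons]
    have hline := innerFold_items l 0 y0 cap (fun k hk => Or.inl (hinv k hk))
    rw [ih (y0 + 1) _ (fun k hk => by
      have hk' : k ∈ (cap.items ++ lineFrom l 0 y0).map (·.1) := by
        simpa [PySem.Dict.keys, hline] using hk
      rw [List.map_append, List.mem_append] at hk'
      rcases hk' with h | h
      · have := hinv k (by simpa [PySem.Dict.keys] using h); omega
      · have := lineFrom_key l 0 y0 k h; omega)]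
    rw [hline, rowsFlat, List.append_assoc]

theorem lineFrom_append (cur : List Int) (a : Int) :
    ∀ (x0 y : Int), lineFrom (cur ++ [a]) x0 y
      = lineFrom cur x0 y ++ [((x0 + (cur.length : Int), y), pyChr a)] := by
  induction cur with
  | nil => intro x0 y; simp [lineFrom]
  | cons b rest ih =>
    intro x0 y
    simp only [List.cons_append, lineFrom, ih (x0 + 1) y, List.length_cons]
    have : x0 + 1 + (rest.length : Int) = x0 + ((rest.length : Int) + 1) := by omega
    push_cast
    rw [this]

theorem rowsFlat_split (buf : List Int) :
    ∀ (cur : List Int) (y : Int),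
      rowsFlat (splitRowsB buf cur) y = lineFrom cur 0 y ++ goA buf (cur.length : Int) y := by
  induction buf with
  | nil => intro cur y; simp [splitRowsB, rowsFlat, goA]
  | cons a rest ih =>
    intro cur y
    by_cases h10 : a = 10
    · simp [splitRowsB, goA, h10, rowsFlat, ih [] (y + 1), lineFrom]
    · simp only [splitRowsB, goA, if_neg h10]
      rw [ih (cur ++ [a]) y, lineFrom_append]
      simp [List.append_assoc]

-- ===== VERDICT (by name: the statement is the Claim_ definition above) =====
theorem capture_camera_spec : Claim_equal_capture_camera := by
  intro buf _ _
  show capture_camera buf = capture_camera_alt buf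
  have hA := captureLoopA_items buf 0 0 PySem.Dict.empty (by simp [PySem.Dict.keys_empty])
  have hB := outerFold_items (splitRowsB buf []) 0 PySem.Dict.empty (by simp [PySem.Dict.keys_empty])
  simp only [capture_camera, capture_camera_alt, hA, hB, rowsFlat_split buf [] 0, lineFrom]
  simp
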